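-- pv_equiv track=rewrite | github.com/markli1hoshipu/gulugulu_poker | source_web/crm/routers/upload_router.py | suggest_column_mappings
-- ===== SOURCE A (Python) =====
-- from typing import Optional, Dict, Any, List
--
-- def suggest_column_mappings(source_columns: List[str]) -> Dict[str, str]:
--     """Suggest mappings between source columns and CRM fields."""
--     mappings = {}
--
--     # Create lowercase versions for matching
--     source_lower = {col.lower(): col for col in source_columns}
--
--     # Define mapping patterns
--     mapping_patterns = {
--         'company': ['company', 'company_name', 'company name', 'organization', 'org', 'business', 'firm'],
--         'primaryContact': ['contact', 'primary_contact', 'primary contact', 'main_contact', 'main contact', 'contact_name', 'contact name', 'name', 'full_name', 'full name'],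
--         'email': ['email', 'email_address', 'email address', 'e_mail', 'e mail', 'mail'],
--         'phone': ['phone', 'phone_number', 'phone number', 'tel', 'telephone', 'mobile', 'cell'],
--         'industry': ['industry', 'sector', 'business_type', 'business type', 'vertical'],
--         'location': ['location', 'address', 'city', 'state', 'country', 'region'],
--         'status': ['status', 'customer_status', 'customer status', 'account_status', 'account status'],
--         'clientType': ['client_type', 'client type', 'customer_type', 'customer type', 'type', 'category'],
--         'arr': ['arr', 'annual_revenue', 'annual revenue', 'yearly_revenue', 'yearly revenue', 'annual_recurring_revenue', 'annual recurring revenue'],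
--         'contractValue': ['contract_value', 'contract value', 'deal_value', 'deal value', 'total_value', 'total value', 'contract_amount', 'contract amount'],
--         'monthlyValue': ['monthly_value', 'monthly value', 'monthly_revenue', 'monthly revenue', 'mrr'],
--         'renewalDate': ['renewal_date', 'renewal date', 'renewal', 'contract_end', 'contract end', 'expiry_date', 'expiry date'],
--         'healthScore': ['health_score', 'health score', 'health', 'score', 'customer_health', 'customer health'],
--         'churnRisk': ['churn_risk', 'churn risk', 'churn', 'risk_level', 'risk level', 'risk'],
--         'satisfactionScore': ['satisfaction_score', 'satisfaction score', 'satisfaction', 'csat', 'nps'],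
--         'expansionPotential': ['expansion_potential', 'expansion potential', 'expansion', 'upsell_potential', 'upsell potential', 'growth_potential', 'growth potential']
--     }
--
--     # Try to match each CRM field
--     for crm_field, patterns in mapping_patterns.items():
--         for pattern in patterns:
--             if pattern in source_lower:
--                 mappings[source_lower[pattern]] = crm_field
--                 break
--
--     return mappings
-- ===== SOURCE B (Python) =====
-- from typing import Optional, Dict, Any, List
--
-- # Inverted index (written out once): lowercase pattern -> (crm_field, priority within that field's pattern list).
-- _PATTERN_INDEX = {
--     'company': ('company', 0),
--     'company_name': ('company', 1),
--     'company name': ('company', 2),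
--     'organization': ('company', 3),
--     'org': ('company', 4),
--     'business': ('company', 5),
--     'firm': ('company', 6),
--     'contact': ('primaryContact', 0),
--     'primary_contact': ('primaryContact', 1),
--     'primary contact': ('primaryContact', 2),
--     'main_contact': ('primaryContact', 3),
--     'main contact': ('primaryContact', 4),
--     'contact_name': ('primaryContact', 5),
--     'contact name': ('primaryContact', 6),
--     'name': ('primaryContact', 7),
--     'full_name': ('primaryContact', 8),
--     'full name': ('primaryContact', 9),
--     'email': ('email', 0),
--     'email_address': ('email', 1),
--     'email address': ('email', 2),
--     'e_mail': ('email', 3),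
--     'e mail': ('email', 4),
--     'mail': ('email', 5),
--     'phone': ('phone', 0),
--     'phone_number': ('phone', 1),
--     'phone number': ('phone', 2),
--     'tel': ('phone', 3),
--     'telephone': ('phone', 4),
--     'mobile': ('phone', 5),
--     'cell': ('phone', 6),
--     'industry': ('industry', 0),
--     'sector': ('industry', 1),
--     'business_type': ('industry', 2),
--     'business type': ('industry', 3),
--     'vertical': ('industry', 4),
--     'location': ('location', 0),
--     'address': ('location', 1),
--     'city': ('location', 2),
--     'state': ('location', 3),
--     'country': ('location', 4),
--     'region': ('location', 5),
--     'status': ('status', 0),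
--     'customer_status': ('status', 1),
--     'customer status': ('status', 2),
--     'account_status': ('status', 3),
--     'account status': ('status', 4),
--     'client_type': ('clientType', 0),
--     'client type': ('clientType', 1),
--     'customer_type': ('clientType', 2),
--     'customer type': ('clientType', 3),
--     'type': ('clientType', 4),
--     'category': ('clientType', 5),
--     'arr': ('arr', 0),
--     'annual_revenue': ('arr', 1),
--     'annual revenue': ('arr', 2),
--     'yearly_revenue': ('arr', 3),
--     'yearly revenue': ('arr', 4),
--     'annual_recurring_revenue': ('arr', 5),
--     'annual recurring revenue': ('arr', 6),
--     'contract_value': ('contractValue', 0),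
--     'contract value': ('contractValue', 1),
--     'deal_value': ('contractValue', 2),
--     'deal value': ('contractValue', 3),
--     'total_value': ('contractValue', 4),
--     'total value': ('contractValue', 5),
--     'contract_amount': ('contractValue', 6),
--     'contract amount': ('contractValue', 7),
--     'monthly_value': ('monthlyValue', 0),
--     'monthly value': ('monthlyValue', 1),
--     'monthly_revenue': ('monthlyValue', 2),
--     'monthly revenue': ('monthlyValue', 3),
--     'mrr': ('monthlyValue', 4),
--     'renewal_date': ('renewalDate', 0),
--     'renewal date': ('renewalDate', 1),
--     'renewal': ('renewalDate', 2),
--     'contract_end': ('renewalDate', 3),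
--     'contract end': ('renewalDate', 4),
--     'expiry_date': ('renewalDate', 5),
--     'expiry date': ('renewalDate', 6),
--     'health_score': ('healthScore', 0),
--     'health score': ('healthScore', 1),
--     'health': ('healthScore', 2),
--     'score': ('healthScore', 3),
--     'customer_health': ('healthScore', 4),
--     'customer health': ('healthScore', 5),
--     'churn_risk': ('churnRisk', 0),
--     'churn risk': ('churnRisk', 1),
--     'churn': ('churnRisk', 2),
--     'risk_level': ('churnRisk', 3),
--     'risk level': ('churnRisk', 4),
--     'risk': ('churnRisk', 5),
--     'satisfaction_score': ('satisfactionScore', 0),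
--     'satisfaction score': ('satisfactionScore', 1),
--     'satisfaction': ('satisfactionScore', 2),
--     'csat': ('satisfactionScore', 3),
--     'nps': ('satisfactionScore', 4),
--     'expansion_potential': ('expansionPotential', 0),
--     'expansion potential': ('expansionPotential', 1),
--     'expansion': ('expansionPotential', 2),
--     'upsell_potential': ('expansionPotential', 3),
--     'upsell potential': ('expansionPotential', 4),
--     'growth_potential': ('expansionPotential', 5),
--     'growth potential': ('expansionPotential', 6),
-- }
--
-- # CRM fields in the order A iterates its pattern table (determines output insertion order).
-- _FIELD_ORDER = ['company', 'primaryContact', 'email', 'phone', 'industry', 'location', 'status', 'clientType', 'arr', 'contractValue', 'monthlyValue', 'renewalDate', 'healthScore', 'churnRisk', 'satisfactionScore', 'expansionPotential']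
--
--
-- def suggest_column_mappings(source_columns: List[str]) -> Dict[str, str]:
--     """Suggest mappings between source columns and CRM fields."""
--     source_lower = {col.lower(): col for col in source_columns}
--
--     # Single pass over the deduplicated columns: per CRM field keep the
--     # matching column whose pattern has the smallest priority index.
--     best = {}
--     for low, orig in source_lower.items():
--         hit = _PATTERN_INDEX.get(low)
--         if hit is not None:
--             field, i = hit
--             cur = best.get(field)
--             if cur is None or i < cur[0]:
--                 best[field] = (i, orig)
--
--     return {best[f][1]: f for f in _FIELD_ORDER if f in best}
-- ===== Notes on version B (the rewrite author's own statement) =====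
-- stated objective: alternative
-- what changed: Replaces A's per-field rescan of the pattern table (for each CRM field, probe the column dict with each pattern until one hits) with a literal inverted index pattern->(field, priority); one pass over the deduplicated columns keeps, per field, the matching column of smallest priority, and the result is emitted in field order.
import Mathlib
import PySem

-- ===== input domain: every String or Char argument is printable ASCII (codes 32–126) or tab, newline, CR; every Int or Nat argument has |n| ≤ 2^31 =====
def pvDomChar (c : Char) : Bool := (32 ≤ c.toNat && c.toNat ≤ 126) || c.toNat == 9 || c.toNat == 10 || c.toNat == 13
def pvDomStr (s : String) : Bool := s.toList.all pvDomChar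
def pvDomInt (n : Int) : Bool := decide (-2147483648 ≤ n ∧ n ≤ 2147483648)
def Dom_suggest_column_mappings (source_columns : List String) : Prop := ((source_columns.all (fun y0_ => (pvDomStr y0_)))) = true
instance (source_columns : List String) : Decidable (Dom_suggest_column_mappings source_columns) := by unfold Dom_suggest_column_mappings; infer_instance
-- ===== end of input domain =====

-- B replaces A's per-field rescan of the pattern table with a literal inverted index
-- pattern -> (field, priority) and a single pass over the deduplicated columns (objective: alternative).

-- ===== PORT A =====
-- A's literal mapping_patterns table
def patternTable : List (String × List String) := [
  ("company", ["company", "company_name", "company name", "organization", "org", "business", "firm"]),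
  ("primaryContact", ["contact", "primary_contact", "primary contact", "main_contact", "main contact", "contact_name", "contact name", "name", "full_name", "full name"]),
  ("email", ["email", "email_address", "email address", "e_mail", "e mail", "mail"]),
  ("phone", ["phone", "phone_number", "phone number", "tel", "telephone", "mobile", "cell"]),
  ("industry", ["industry", "sector", "business_type", "business type", "vertical"]),
  ("location", ["location", "address", "city", "state", "country", "region"]),
  ("status", ["status", "customer_status", "customer status", "account_status", "account status"]),
  ("clientType", ["client_type", "client type", "customer_type", "customer type", "type", "category"]),
  ("arr", ["arr", "annual_revenue", "annual revenue", "yearly_revenue", "yearly revenue", "annual_recurring_revenue", "annual recurring revenue"]),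
  ("contractValue", ["contract_value", "contract value", "deal_value", "deal value", "total_value", "total value", "contract_amount", "contract amount"]),
  ("monthlyValue", ["monthly_value", "monthly value", "monthly_revenue", "monthly revenue", "mrr"]),
  ("renewalDate", ["renewal_date", "renewal date", "renewal", "contract_end", "contract end", "expiry_date", "expiry date"]),
  ("healthScore", ["health_score", "health score", "health", "score", "customer_health", "customer health"]),
  ("churnRisk", ["churn_risk", "churn risk", "churn", "risk_level", "risk level", "risk"]),
  ("satisfactionScore", ["satisfaction_score", "satisfaction score", "satisfaction", "csat", "nps"]),
  ("expansionPotential", ["expansion_potential", "expansion potential", "expansion", "upsell_potential", "upsell potential", "growth_potential", "growth potential"])]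

-- inner loop of A: for pattern in patterns: if pattern in source_lower: mappings[source_lower[pattern]] = crm_field; break
def matchFieldA (sl : PySem.Dict String String) (m : PySem.Dict String String) (f : String) : List String → PySem.Dict String String
  | [] => m
  | p :: ps =>
    match sl.get? p with
    | some col => m.insert col f
    | none => matchFieldA sl m f ps

def suggest_column_mappings (source_columns : List String) : List (String × String) :=
  let source_lower : PySem.Dict String String :=
    source_columns.foldl (fun d c => d.insert (PySem.Str.lower c) c) PySem.Dict.empty
  (patternTable.foldl (fun m fp => matchFieldA source_lower m fp.1 fp.2) PySem.Dict.empty).items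

-- ===== PORT B =====
-- B's literal _PATTERN_INDEX: pattern -> (crm_field, priority)
def ixLit : List (String × String × Int) := [
  ("company", ("company", (0 : Int))),
  ("company_name", ("company", (1 : Int))),
  ("company name", ("company", (2 : Int))),
  ("organization", ("company", (3 : Int))),
  ("org", ("company", (4 : Int))),
  ("business", ("company", (5 : Int))),
  ("firm", ("company", (6 : Int))),
  ("contact", ("primaryContact", (0 : Int))),
  ("primary_contact", ("primaryContact", (1 : Int))),
  ("primary contact", ("primaryContact", (2 : Int))),
  ("main_contact", ("primaryContact", (3 : Int))),
  ("main contact", ("primaryContact", (4 : Int))),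
  ("contact_name", ("primaryContact", (5 : Int))),
  ("contact name", ("primaryContact", (6 : Int))),
  ("name", ("primaryContact", (7 : Int))),
  ("full_name", ("primaryContact", (8 : Int))),
  ("full name", ("primaryContact", (9 : Int))),
  ("email", ("email", (0 : Int))),
  ("email_address", ("email", (1 : Int))),
  ("email address", ("email", (2 : Int))),
  ("e_mail", ("email", (3 : Int))),
  ("e mail", ("email", (4 : Int))),
  ("mail", ("email", (5 : Int))),
  ("phone", ("phone", (0 : Int))),
  ("phone_number", ("phone", (1 : Int))),
  ("phone number", ("phone", (2 : Int))),
  ("tel", ("phone", (3 : Int))),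
  ("telephone", ("phone", (4 : Int))),
  ("mobile", ("phone", (5 : Int))),
  ("cell", ("phone", (6 : Int))),
  ("industry", ("industry", (0 : Int))),
  ("sector", ("industry", (1 : Int))),
  ("business_type", ("industry", (2 : Int))),
  ("business type", ("industry", (3 : Int))),
  ("vertical", ("industry", (4 : Int))),
  ("location", ("location", (0 : Int))),
  ("address", ("location", (1 : Int))),
  ("city", ("location", (2 : Int))),
  ("state", ("location", (3 : Int))),
  ("country", ("location", (4 : Int))),
  ("region", ("location", (5 : Int))),
  ("status", ("status", (0 : Int))),
  ("customer_status", ("status", (1 : Int))),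
  ("customer status", ("status", (2 : Int))),
  ("account_status", ("status", (3 : Int))),
  ("account status", ("status", (4 : Int))),
  ("client_type", ("clientType", (0 : Int))),
  ("client type", ("clientType", (1 : Int))),
  ("customer_type", ("clientType", (2 : Int))),
  ("customer type", ("clientType", (3 : Int))),
  ("type", ("clientType", (4 : Int))),
  ("category", ("clientType", (5 : Int))),
  ("arr", ("arr", (0 : Int))),
  ("annual_revenue", ("arr", (1 : Int))),
  ("annual revenue", ("arr", (2 : Int))),
  ("yearly_revenue", ("arr", (3 : Int))),
  ("yearly revenue", ("arr", (4 : Int))),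
  ("annual_recurring_revenue", ("arr", (5 : Int))),
  ("annual recurring revenue", ("arr", (6 : Int))),
  ("contract_value", ("contractValue", (0 : Int))),
  ("contract value", ("contractValue", (1 : Int))),
  ("deal_value", ("contractValue", (2 : Int))),
  ("deal value", ("contractValue", (3 : Int))),
  ("total_value", ("contractValue", (4 : Int))),
  ("total value", ("contractValue", (5 : Int))),
  ("contract_amount", ("contractValue", (6 : Int))),
  ("contract amount", ("contractValue", (7 : Int))),
  ("monthly_value", ("monthlyValue", (0 : Int))),
  ("monthly value", ("monthlyValue", (1 : Int))),
  ("monthly_revenue", ("monthlyValue", (2 : Int))),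
  ("monthly revenue", ("monthlyValue", (3 : Int))),
  ("mrr", ("monthlyValue", (4 : Int))),
  ("renewal_date", ("renewalDate", (0 : Int))),
  ("renewal date", ("renewalDate", (1 : Int))),
  ("renewal", ("renewalDate", (2 : Int))),
  ("contract_end", ("renewalDate", (3 : Int))),
  ("contract end", ("renewalDate", (4 : Int))),
  ("expiry_date", ("renewalDate", (5 : Int))),
  ("expiry date", ("renewalDate", (6 : Int))),
  ("health_score", ("healthScore", (0 : Int))),
  ("health score", ("healthScore", (1 : Int))),
  ("health", ("healthScore", (2 : Int))),
  ("score", ("healthScore", (3 : Int))),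
  ("customer_health", ("healthScore", (4 : Int))),
  ("customer health", ("healthScore", (5 : Int))),
  ("churn_risk", ("churnRisk", (0 : Int))),
  ("churn risk", ("churnRisk", (1 : Int))),
  ("churn", ("churnRisk", (2 : Int))),
  ("risk_level", ("churnRisk", (3 : Int))),
  ("risk level", ("churnRisk", (4 : Int))),
  ("risk", ("churnRisk", (5 : Int))),
  ("satisfaction_score", ("satisfactionScore", (0 : Int))),
  ("satisfaction score", ("satisfactionScore", (1 : Int))),
  ("satisfaction", ("satisfactionScore", (2 : Int))),
  ("csat", ("satisfactionScore", (3 : Int))),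
  ("nps", ("satisfactionScore", (4 : Int))),
  ("expansion_potential", ("expansionPotential", (0 : Int))),
  ("expansion potential", ("expansionPotential", (1 : Int))),
  ("expansion", ("expansionPotential", (2 : Int))),
  ("upsell_potential", ("expansionPotential", (3 : Int))),
  ("upsell potential", ("expansionPotential", (4 : Int))),
  ("growth_potential", ("expansionPotential", (5 : Int))),
  ("growth potential", ("expansionPotential", (6 : Int)))]

def patternIndexB : PySem.Dict String (String × Int) := PySem.Dict.ofList ixLit

-- B's literal _FIELD_ORDER
def fieldOrder : List String := ["company", "primaryContact", "email", "phone", "industry", "location", "status", "clientType", "arr", "contractValue", "monthlyValue", "renewalDate", "healthScore", "churnRisk", "satisfactionScore", "expansionPotential"]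

-- body of B's single pass: update per-field best (smallest priority index wins)
def bestStep (b : PySem.Dict String (Int × String)) (it : String × String) : PySem.Dict String (Int × String) :=
  match patternIndexB.get? it.1 with
  | some fi =>
    match b.get? fi.1 with
    | some cur => if fi.2 < cur.1 then b.insert fi.1 (fi.2, it.2) else b
    | none => b.insert fi.1 (fi.2, it.2)
  | none => b

def suggest_column_mappings_alt (source_columns : List String) : List (String × String) :=
  let source_lower : PySem.Dict String String :=
    source_columns.foldl (fun d c => d.insert (PySem.Str.lower c) c) PySem.Dict.empty
  let best : PySem.Dict String (Int × String) :=
    source_lower.items.foldl bestStep PySem.Dict.empty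
  (fieldOrder.foldl
    (fun m f =>
      match best.get? f with
      | some c => m.insert c.2 f
      | none => m)
    PySem.Dict.empty).items

-- ===== PRECONDITION & SPEC =====
def Spec_suggest_column_mappings (source_columns : List String) (out : List (String × String)) : Prop := out = suggest_column_mappings_alt source_columns
instance (source_columns : List String) (out : List (String × String)) : Decidable (Spec_suggest_column_mappings source_columns out) := by unfold Spec_suggest_column_mappings; infer_instance

-- ===== CLAIM (what is proved, stated in full; the proofs are below) =====
def Claim_equal_suggest_column_mappings : Prop := ∀ (source_columns : List String), Dom_suggest_column_mappings source_columns → Spec_suggest_column_mappings source_columns (suggest_column_mappings source_columns)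

-- ===== LEMMAS AND PROOFS =====

set_option maxRecDepth 40000 in
lemma patternIndexB_eq : patternIndexB = PySem.Dict.mk ixLit := by decide

lemma fieldOrder_eq : fieldOrder = patternTable.map Prod.fst := by decide

set_option maxRecDepth 40000 in
lemma fact1 : ∀ fp ∈ patternTable, ∀ k : Fin fp.2.length,
    (PySem.Dict.mk ixLit).get? fp.2[k] = some (fp.1, (k.val : Int)) := by decide

set_option maxRecDepth 40000 in
lemma fact2 : ∀ e ∈ ixLit, ∀ fp ∈ patternTable, e.2.1 = fp.1 →
    0 ≤ e.2.2 ∧ fp.2[e.2.2.toNat]? = some e.1 := by decide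

-- candidate produced by one source_lower item for field f
def candOf (f : String) (it : String × String) : Option (Int × String) :=
  match patternIndexB.get? it.1 with
  | some fi => if fi.1 = f then some (fi.2, it.2) else none
  | none => none

-- selection kept by B's pass: strictly smaller priority replaces, earlier wins ties
def mergeB (cur c : Option (Int × String)) : Option (Int × String) :=
  match c with
  | none => cur
  | some c' =>
    match cur with
    | none => some c'
    | some cur' => if c'.1 < cur'.1 then some c' else some cur'

def bo (f : String) : List (String × String) → Option (Int × String)
  | [] => none
  | it :: L => mergeB (candOf f it) (bo f L)

-- A's scan of one pattern row, carrying the priority index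
def aScan (sl : PySem.Dict String String) : List String → Int → Option (Int × String)
  | [], _ => none
  | p :: ps, j =>
    match sl.get? p with
    | some col => some (j, col)
    | none => aScan sl ps (j + 1)

lemma mergeB_none_right (x : Option (Int × String)) : mergeB x none = x := rfl

lemma mergeB_none_left (y : Option (Int × String)) : mergeB none y = y := by
  cases y <;> rfl

lemma mergeB_some_some (cur c : Int × String) :
    mergeB (some cur) (some c) = if c.1 < cur.1 then some c else some cur := rfl

lemma mergeB_assoc (a b c : Option (Int × String)) :
    mergeB (mergeB a b) c = mergeB a (mergeB b c) := by
  rcases c with _ | c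
  · rw [mergeB_none_right, mergeB_none_right]
  · rcases b with _ | b
    · rw [mergeB_none_right, mergeB_none_left]
    · rcases a with _ | a
      · rw [mergeB_none_left, mergeB_none_left]
      · by_cases h1 : b.1 < a.1 <;> by_cases h2 : c.1 < b.1 <;> by_cases h3 : c.1 < a.1 <;>
          simp only [mergeB_some_some, h1, h2, h3, if_pos, if_neg, not_false_iff] <;>
          first
            | rfl
            | (exfalso; omega)

lemma bestStep_get? (b : PySem.Dict String (Int × String)) (it : String × String) (f : String) :
    (bestStep b it).get? f = mergeB (b.get? f) (candOf f it) := by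
  unfold bestStep candOf
  rcases h : patternIndexB.get? it.1 with _ | fi <;> simp only
  · rw [mergeB_none_right]
  · by_cases hf : fi.1 = f
    · subst hf
      rcases hb : b.get? fi.1 with _ | cur
      · simp [mergeB, PySem.Dict.get?_insert_self]
      · simp only [if_pos trivial, mergeB_some_some]
        split_ifs with hlt
        · simp [PySem.Dict.get?_insert_self]
        · exact hb
    · have hne : f ≠ fi.1 := Ne.symm hf
      rw [if_neg hf, mergeB_none_right]
      rcases hb : b.get? fi.1 with _ | cur <;> simp only
      · rw [PySem.Dict.get?_insert_of_ne _ _ hne]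
      · split_ifs
        · rw [PySem.Dict.get?_insert_of_ne _ _ hne]
        · rfl

lemma foldl_bestStep_get? (f : String) :
    ∀ (L : List (String × String)) (b : PySem.Dict String (Int × String)),
      (L.foldl bestStep b).get? f = mergeB (b.get? f) (bo f L)
  | [], b => by rw [List.foldl_nil, bo, mergeB_none_right]
  | it :: L, b => by
    rw [List.foldl_cons, bo, foldl_bestStep_get? f L, bestStep_get?, mergeB_assoc]

lemma bo_none_iff (f : String) :
    ∀ L : List (String × String), bo f L = none ↔ ∀ it ∈ L, candOf f it = none
  | [] => by simp [bo]
  | it :: L => by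
    rw [bo]
    rcases hc : candOf f it with _ | c <;> rcases hb : bo f L with _ | d
    · rw [mergeB_none_right]
      refine ⟨fun _ x hx => ?_, fun _ => rfl⟩
      rcases List.mem_cons.mp hx with rfl | hx
      · exact hc
      · exact ((bo_none_iff f L).mp hb) x hx
    · rw [mergeB_none_left]
      refine ⟨fun h => (by cases h), fun h => ?_⟩
      have := (bo_none_iff f L).mpr fun x hx => h x (List.mem_cons_of_mem _ hx)
      rw [this] at hb; cases hb
    · rw [mergeB_none_right]
      refine ⟨fun h => (by cases h), fun h => ?_⟩
      have := h it List.mem_cons_self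
      rw [this] at hc; cases hc
    · rw [mergeB_some_some]
      refine ⟨fun h => (by split_ifs at h), fun h => ?_⟩
      have := h it List.mem_cons_self
      rw [this] at hc; cases hc

lemma bo_mem (f : String) :
    ∀ L : List (String × String), ∀ c, bo f L = some c → ∃ it ∈ L, candOf f it = some c
  | [], c => by simp [bo]
  | it :: L, c => by
    intro h
    rw [bo] at h
    rcases hc : candOf f it with _ | c1 <;> rw [hc] at h
    · rw [mergeB_none_left] at h
      rcases bo_mem f L c h with ⟨x, hx, hcx⟩
      exact ⟨x, List.mem_cons_of_mem _ hx, hcx⟩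
    · rcases hb : bo f L with _ | d <;> rw [hb] at h
      · rw [mergeB_none_right] at h
        exact ⟨it, List.mem_cons_self, by rw [hc, h]⟩
      · rw [mergeB_some_some] at h
        split_ifs at h
        · rcases bo_mem f L d hb with ⟨x, hx, hcx⟩
          exact ⟨x, List.mem_cons_of_mem _ hx, by rw [hcx, h]⟩
        · exact ⟨it, List.mem_cons_self, by rw [hc, h]⟩

lemma bo_min (f : String) :
    ∀ L : List (String × String), ∀ c, bo f L = some c →
      ∀ it ∈ L, ∀ c', candOf f it = some c' → c.1 ≤ c'.1
  | [], c => by simp [bo]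
  | it :: L, c => by
    intro h x hx c' hc'
    rw [bo] at h
    rcases hc : candOf f it with _ | c1 <;> rw [hc] at h
    · rw [mergeB_none_left] at h
      rcases List.mem_cons.mp hx with rfl | hx
      · rw [hc] at hc'; cases hc'
      · exact bo_min f L _ h x hx c' hc'
    · rcases hb : bo f L with _ | d <;> rw [hb] at h
      · rw [mergeB_none_right] at h
        cases h
        rcases List.mem_cons.mp hx with rfl | hx
        · rw [hc] at hc'; cases hc'; exact le_refl _
        · exact absurd (((bo_none_iff f L).mp hb) x hx) (by rw [hc']; simp)
      · rw [mergeB_some_some] at h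
        have hd := bo_min f L d hb
        rcases List.mem_cons.mp hx with rfl | hx
        · rw [hc] at hc'
          injection hc' with hc''
          subst hc''
          split_ifs at h with hlt <;> injection h with h' <;> subst h'
          · omega
          · omega
        · have hthis := hd x hx c' hc'
          split_ifs at h with hlt <;> injection h with h' <;> subst h'
          · exact hthis
          · omega

lemma aScan_none_iff (sl : PySem.Dict String String) :
    ∀ (ps : List String) (j : Int), aScan sl ps j = none ↔ ∀ p ∈ ps, sl.get? p = none
  | [], j => by simp [aScan]
  | p :: ps, j => by
    rw [aScan]
    rcases h : sl.get? p with _ | col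
    · simp only [List.mem_cons]
      constructor
      · intro hr x hx
        rcases hx with rfl | hx
        · exact h
        · exact (aScan_none_iff sl ps (j + 1)).mp hr x hx
      · intro hall
        exact (aScan_none_iff sl ps (j + 1)).mpr fun x hx => hall x (Or.inr hx)
    · constructor
      · intro hr; cases hr
      · intro hall; exact absurd (hall p List.mem_cons_self) (by rw [h]; simp)

lemma aScan_some (sl : PySem.Dict String String) :
    ∀ (ps : List String) (j : Int) (c : Int × String), aScan sl ps j = some c →
      ∃ k : Nat, ∃ p, c.1 = j + (k : Int) ∧ ps[k]? = some p ∧ sl.get? p = some c.2 ∧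
        ∀ k' : Nat, k' < k → ∀ p', ps[k']? = some p' → sl.get? p' = none
  | [], j, c => by simp [aScan]
  | p :: ps, j, c => by
    intro h
    rw [aScan] at h
    rcases hp : sl.get? p with _ | col <;> rw [hp] at h
    · rcases aScan_some sl ps (j + 1) c h with ⟨k, q, hc1, hq, hsl, hmin⟩
      refine ⟨k + 1, q, by omega, by simpa using hq, hsl, ?_⟩
      intro k' hk' p' hp'
      cases k' with
      | zero => simp at hp'; subst hp'; exact hp
      | succ k'' => exact hmin k'' (by omega) p' (by simpa using hp')
    · cases h
      exact ⟨0, p, by simp, by simp, hp, by omega⟩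

lemma candOf_of_hit (fp : String × List String) (hfp : fp ∈ patternTable)
    (k : Nat) (p : String) (hk : fp.2[k]? = some p) (col : String) :
    candOf fp.1 (p, col) = some ((k : Int), col) := by
  have hlen : k < fp.2.length := (List.getElem?_eq_some_iff.mp hk).1
  have h1 := fact1 fp hfp ⟨k, hlen⟩
  have hpk : fp.2[k] = p := by
    have := (List.getElem?_eq_some_iff.mp hk).2
    simpa using this
  simp only [Fin.getElem_fin] at h1
  rw [hpk] at h1
  unfold candOf
  rw [patternIndexB_eq]
  simp [h1]

lemma candOf_inv (f : String) (it : String × String) (c : Int × String)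
    (h : candOf f it = some c) :
    patternIndexB.get? it.1 = some (f, c.1) ∧ c.2 = it.2 := by
  unfold candOf at h
  rcases hx : patternIndexB.get? it.1 with _ | fi
  · rw [hx] at h
    cases h
  · rw [hx] at h
    dsimp only at h
    split_ifs at h with hf
    cases h
    exact ⟨by rw [← hf], rfl⟩

-- KEY: for a row of the table, B's best entry for the field equals A's scan of the row
set_option maxRecDepth 4000 in
lemma key_lemma (fp : String × List String) (hfp : fp ∈ patternTable)
    (sl : PySem.Dict String String) (hnd : sl.keys.Nodup) :
    bo fp.1 sl.items = aScan sl fp.2 0 := by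
  rcases h2 : aScan sl fp.2 0 with _ | d <;> rcases h1 : bo fp.1 sl.items with _ | c
  · rfl
  · -- aScan none, bo some: contradiction
    exfalso
    rcases bo_mem _ _ _ h1 with ⟨it, hit, hcand⟩
    rcases candOf_inv _ _ _ hcand with ⟨hix, _⟩
    have hmem : (it.1, (fp.1, c.1)) ∈ ixLit := by
      have := PySem.Dict.mem_items_of_get?_eq_some patternIndexB hix
      rw [patternIndexB_eq] at this
      exact this
    rcases fact2 _ hmem fp hfp rfl with ⟨_, hk⟩
    simp only at hk
    have hpmem : it.1 ∈ fp.2 := List.mem_of_getElem? hk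
    have hsl : sl.get? it.1 = some it.2 := by
      rcases it with ⟨k0, v0⟩
      exact PySem.Dict.get?_of_mem_items sl hit hnd
    have := (aScan_none_iff sl fp.2 0).mp h2 it.1 hpmem
    rw [hsl] at this; cases this
  · -- aScan some, bo none: contradiction
    exfalso
    rcases aScan_some sl fp.2 0 d h2 with ⟨k, p, _, hk, hsl, _⟩
    have hit : (p, d.2) ∈ sl.items := PySem.Dict.mem_items_of_get?_eq_some sl hsl
    have hcand := candOf_of_hit fp hfp k p hk d.2
    have := (bo_none_iff fp.1 sl.items).mp h1 (p, d.2) hit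
    rw [hcand] at this; cases this
  · -- both some: equal
    rcases bo_mem _ _ _ h1 with ⟨it, hit, hcand⟩
    rcases candOf_inv _ _ _ hcand with ⟨hix, hc2⟩
    have hmem : (it.1, (fp.1, c.1)) ∈ ixLit := by
      have := PySem.Dict.mem_items_of_get?_eq_some patternIndexB hix
      rw [patternIndexB_eq] at this
      exact this
    rcases fact2 _ hmem fp hfp rfl with ⟨hc1nn, hk1⟩
    simp only at hc1nn hk1
    have hslit : sl.get? it.1 = some it.2 := by
      rcases it with ⟨k0, v0⟩
      exact PySem.Dict.get?_of_mem_items sl hit hnd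
    rcases aScan_some sl fp.2 0 d h2 with ⟨k, p, hd1, hk, hsl, hmin⟩
    have hitp : (p, d.2) ∈ sl.items := PySem.Dict.mem_items_of_get?_eq_some sl hsl
    have hcandp := candOf_of_hit fp hfp k p hk d.2
    have hle : c.1 ≤ (k : Int) := bo_min _ _ _ h1 (p, d.2) hitp _ hcandp
    have hge : ¬ c.1.toNat < k := by
      intro hlt
      have := hmin c.1.toNat hlt it.1 hk1
      rw [hslit] at this; cases this
    have hc1 : c.1 = (k : Int) := by omega
    have hpe : it.1 = p := by
      rw [hc1] at hk1
      simp only [Int.toNat_natCast] at hk1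
      rw [hk1] at hk; cases hk; rfl
    have hval : some it.2 = some d.2 := by rw [← hslit, hpe, hsl]
    have hval' : it.2 = d.2 := Option.some.inj hval
    have hcd : c = d := by
      have h1' : c.1 = d.1 := by omega
      have h2' : c.2 = d.2 := by rw [hc2, hval']
      exact Prod.ext h1' h2'
    rw [hcd]

lemma matchFieldA_eq (sl : PySem.Dict String String) (f : String) :
    ∀ (ps : List String) (m : PySem.Dict String String) (j : Int),
      matchFieldA sl m f ps =
        (match aScan sl ps j with
         | some c => m.insert c.2 f
         | none => m)
  | [], m, j => rfl
  | p :: ps, m, j => by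
    rw [matchFieldA, aScan]
    rcases sl.get? p with _ | col
    · exact matchFieldA_eq sl f ps m (j + 1)
    · rfl

-- ===== VERDICT (by name: the statement is the Claim_ definition above) =====
theorem suggest_column_mappings_spec : Claim_equal_suggest_column_mappings := by
  intro source_columns _
  unfold Spec_suggest_column_mappings suggest_column_mappings suggest_column_mappings_alt
  simp only
  set sl : PySem.Dict String String :=
    source_columns.foldl (fun d c => d.insert (PySem.Str.lower c) c) PySem.Dict.empty with hsl
  have hnd : sl.keys.Nodup := by
    rw [hsl]
    exact PySem.Dict.nodup_keys_foldl_insert_key source_columns (fun c => PySem.Str.lower c)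
      (fun _ c => c) PySem.Dict.empty (by simp)
  rw [fieldOrder_eq, List.foldl_map]
  congr 1
  apply PySem.List.foldl_congr_mem
  intro m fp hfp
  rw [matchFieldA_eq sl fp.1 fp.2 m 0]
  have hb : ((sl.items.foldl bestStep PySem.Dict.empty).get? fp.1 : Option (Int × String)) = aScan sl fp.2 0 := by
    rw [foldl_bestStep_get?, key_lemma fp hfp sl hnd]
    rw [PySem.Dict.get?_empty, mergeB_none_left]
  rw [hb]
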